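-- pv_equiv track=rewrite | github.com/luongnv89/skills | skills/security-setup/scripts/security_check.py | format_counter
-- ===== SOURCE A (Python) =====
-- SEVERITY_ORDER = ["CRITICAL", "HIGH", "MEDIUM", "LOW", "INFO"]
--
-- def format_counter(counter: dict[str, int]) -> str:
--     if not counter:
--         return "none"
--     ordered = []
--     for key in SEVERITY_ORDER:
--         if key in counter:
--             ordered.append(f"{key}={counter[key]}")
--     for key in sorted(set(counter) - set(SEVERITY_ORDER)):
--         ordered.append(f"{key}={counter[key]}")
--     return ", ".join(ordered)
-- ===== SOURCE B (Python) =====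
-- SEVERITY_ORDER = ["CRITICAL", "HIGH", "MEDIUM", "LOW", "INFO"]
-- _RANK = {name: i for i, name in enumerate(SEVERITY_ORDER)}
--
-- def _rank(key: str) -> int:
--     return _RANK.get(key, len(SEVERITY_ORDER))
--
-- def format_counter(counter: dict[str, int]) -> str:
--     if not counter:
--         return "none"
--     keys = sorted(counter, key=lambda k: (_rank(k), k))
--     return ", ".join(f"{k}={counter[k]}" for k in keys)
-- ===== Notes on version B (the rewrite author's own statement) =====
-- stated objective: idiomatic
-- what changed: Replaces A's two separate passes (scan SEVERITY_ORDER for present keys, then a set-difference plus sorted() for the leftovers) by one sort of all keys under a composite (rank, name) key built from a rank dict, formatted and joined in a single expression.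
import Mathlib
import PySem

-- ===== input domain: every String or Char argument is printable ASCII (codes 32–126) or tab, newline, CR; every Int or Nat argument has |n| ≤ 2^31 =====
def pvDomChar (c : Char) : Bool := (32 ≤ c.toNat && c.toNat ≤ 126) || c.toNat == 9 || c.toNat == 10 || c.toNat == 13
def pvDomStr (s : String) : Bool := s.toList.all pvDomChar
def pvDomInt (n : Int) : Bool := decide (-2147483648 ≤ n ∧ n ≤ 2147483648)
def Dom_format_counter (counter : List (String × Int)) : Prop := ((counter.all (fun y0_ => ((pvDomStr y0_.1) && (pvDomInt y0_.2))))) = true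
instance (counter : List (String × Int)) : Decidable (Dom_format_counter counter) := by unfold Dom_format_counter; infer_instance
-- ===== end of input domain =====

-- B replaces A's two ordered/leftover passes by one sort of all keys under a composite (rank, name) key; same results, no speed claim.

def pvSeverityOrder : List String := ["CRITICAL", "HIGH", "MEDIUM", "LOW", "INFO"]

-- ===== PORT A =====
def format_counter (counter : List (String × Int)) : String :=
  if counter = [] then "none"
  else
    let d := PySem.Dict.ofList counter
    let ordered := pvSeverityOrder.foldl
      (fun acc key => if d.contains key then acc ++ [key ++ "=" ++ PySem.Int.toStr (d.getD key 0)] else acc) []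
    let ordered := (PySem.List.sorted (PySem.Set.diff (PySem.Set.ofList d.keys) (PySem.Set.ofList pvSeverityOrder)) (fun x => x) false).foldl
      (fun acc key => acc ++ [key ++ "=" ++ PySem.Int.toStr (d.getD key 0)]) ordered
    PySem.Str.join ", " ordered

-- ===== PORT B =====
-- _RANK = {name: i for i, name in enumerate(SEVERITY_ORDER)}; _rank(key) = _RANK.get(key, len(SEVERITY_ORDER))
def pvRank (key : String) : Int :=
  ((PySem.List.enumerate pvSeverityOrder).foldl
      (fun r p => r.insert p.2 p.1) PySem.Dict.empty).getD key (pvSeverityOrder.length : Int)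

def format_counter_alt (counter : List (String × Int)) : String :=
  if counter = [] then "none"
  else
    let d := PySem.Dict.ofList counter
    let keys := PySem.List.sorted2 d.keys (fun k => pvRank k) (fun k => k) false
    PySem.Str.join ", " (keys.map (fun k => k ++ "=" ++ PySem.Int.toStr (d.getD k 0)))

-- ===== PRECONDITION & SPEC =====
def Spec_format_counter (counter : List (String × Int)) (out : String) : Prop := out = format_counter_alt counter
instance (counter : List (String × Int)) (out : String) : Decidable (Spec_format_counter counter out) := by unfold Spec_format_counter; infer_instance

-- ===== CLAIM (what is proved, stated in full; the proofs are below) =====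
def Claim_equal_format_counter : Prop := ∀ (counter : List (String × Int)), Dom_format_counter counter → Spec_format_counter counter (format_counter counter)

-- ===== LEMMAS AND PROOFS =====

theorem pvRank_of_not_mem (k : String) (h : k ∉ pvSeverityOrder) : pvRank k = 5 := by
  simp only [pvSeverityOrder, List.mem_cons, List.not_mem_nil, or_false, not_or] at h
  obtain ⟨h1, h2, h3, h4, h5⟩ := h
  have e1 : ("CRITICAL" == k) = false := beq_eq_false_iff_ne.2 (Ne.symm h1)
  have e2 : ("HIGH" == k) = false := beq_eq_false_iff_ne.2 (Ne.symm h2)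
  have e3 : ("MEDIUM" == k) = false := beq_eq_false_iff_ne.2 (Ne.symm h3)
  have e4 : ("LOW" == k) = false := beq_eq_false_iff_ne.2 (Ne.symm h4)
  have e5 : ("INFO" == k) = false := beq_eq_false_iff_ne.2 (Ne.symm h5)
  simp [e1, e2, e3, e4, e5, pvRank, PySem.List.enumerate, pvSeverityOrder, PySem.Dict.getD, PySem.Dict.insert,
        PySem.Dict.get?, PySem.Dict.empty, List.find?]

theorem pvRank_lt_of_mem (k : String) (h : k ∈ pvSeverityOrder) : pvRank k < 5 := by
  simp only [pvSeverityOrder, List.mem_cons, List.not_mem_nil, or_false] at h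
  rcases h with h | h | h | h | h <;> subst h <;> decide

theorem pvSeverity_pairwise_rank : List.Pairwise (fun a b => pvRank a < pvRank b) pvSeverityOrder := by
  decide

-- sorted2 is sorted under the lexicographic key
theorem sorted2_eq_sorted_lex {α : Type} {κ₁ κ₂ : Type} [LinearOrder κ₁] [LinearOrder κ₂]
    (xs : List α) (k1 : α → κ₁) (k2 : α → κ₂) :
    PySem.List.sorted2 xs k1 k2 false = PySem.List.sorted xs (fun x => toLex (k1 x, k2 x)) false := by
  have hbf : (fun a b => decide (k1 a < k1 b) || (!decide (k1 b < k1 a) && decide (k2 a < k2 b)))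
      = (fun a b : α => decide (toLex (k1 a, k2 a) < toLex (k1 b, k2 b))) := by
    funext a b
    rcases lt_trichotomy (k1 a) (k1 b) with h | h | h
    · simp [h, Prod.Lex.toLex_lt_toLex, not_lt.2 (le_of_lt h)]
    · simp [h, Prod.Lex.toLex_lt_toLex]
    · simp [h, not_lt.2 (le_of_lt h), Prod.Lex.toLex_lt_toLex, ne_of_gt h]
  rw [PySem.List.sorted_eq_foldl_insertBy]
  simp only [PySem.List.sorted2, Bool.false_eq_true, if_false, hbf]

theorem pairwise_lt_of_pairwise_le_nodup {α : Type} [LinearOrder α] {l : List α}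
    (hle : List.Pairwise (fun a b => a ≤ b) l) (hnd : l.Nodup) :
    List.Pairwise (fun a b => a < b) l :=
  (hle.and hnd).imp (fun h => lt_of_le_of_ne h.1 h.2)

theorem keys_ofList (counter : List (String × Int)) :
    (PySem.Dict.ofList counter).keys = PySem.Set.ofList (counter.map (·.1)) := by
  have := PySem.Dict.keys_foldl_insert_key (ν := Int) counter (fun p => p.1) (fun _ p => p.2) PySem.Dict.empty
  simpa [PySem.Dict.ofList, PySem.Dict.update, PySem.Set.update, PySem.Set.ofList_eq_foldl] using this

theorem set_ofList_self {α : Type} [BEq α] [LawfulBEq α] (l : List α) (h : l.Nodup) :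
    PySem.Set.ofList l = l := by
  have := PySem.Set.update_eq_append_of_disjoint ([] : PySem.Set α) l h (by simp)
  simpa [PySem.Set.ofList_eq_foldl, PySem.Set.update] using this

theorem flatMap_singleton_map {α β : Type} (f : α → β) (l : List α) :
    l.flatMap (fun x => [f x]) = l.map f := by
  induction l with
  | nil => rfl
  | cons x xs ih => simp [ih]

-- the central fact: B's one-pass sort equals A's two concatenated passes, for any nodup key list
theorem sorted2_keys_split (ks : List String) (hnd : ks.Nodup) :
    PySem.List.sorted2 ks (fun k => pvRank k) (fun k => k) false =
      pvSeverityOrder.filter (fun k => k ∈ ks) ++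
        PySem.List.sorted (ks.filter (fun k => !(k ∈ pvSeverityOrder : Bool))) (fun x => x) false := by
  rw [sorted2_eq_sorted_lex]
  set p1 := pvSeverityOrder.filter (fun k => k ∈ ks) with hp1
  set p2 := PySem.List.sorted (ks.filter (fun k => !(k ∈ pvSeverityOrder : Bool))) (fun x => x) false with hp2
  have hp2perm : p2.Perm (ks.filter (fun k => !(k ∈ pvSeverityOrder : Bool))) :=
    PySem.List.sorted_perm _ _ _
  have hmem2 : ∀ b ∈ p2, b ∈ ks ∧ b ∉ pvSeverityOrder := by
    intro b hb
    have hb' := hp2perm.mem_iff.1 hb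
    exact ⟨List.mem_of_mem_filter hb', by simpa using List.of_mem_filter hb'⟩
  have hmem1 : ∀ a ∈ p1, a ∈ pvSeverityOrder := fun a ha => List.mem_of_mem_filter ha
  apply PySem.List.sorted_eq_of_perm_of_pairwise_lt
  · -- permutation
    have h1 : p1.Perm (ks.filter (fun k => (k ∈ pvSeverityOrder : Bool))) := by
      apply List.perm_of_nodup_nodup_toFinset_eq
      · exact List.Nodup.filter _ (by decide)
      · exact List.Nodup.filter _ hnd
      · ext x
        simp [hp1, and_comm]
    exact (h1.append hp2perm).trans (List.filter_append_perm _ ks)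
  · -- pairwise strict lex order
    rw [List.pairwise_append]
    refine ⟨?_, ?_, ?_⟩
    · refine List.Pairwise.imp ?_ (pvSeverity_pairwise_rank.sublist List.filter_sublist)
      intro a b h
      exact Prod.Lex.toLex_lt_toLex.2 (Or.inl h)
    · have hnd2 : p2.Nodup := hp2perm.nodup_iff.2 (List.Nodup.filter _ hnd)
      have hle : List.Pairwise (fun a b : String => a ≤ b) p2 := by
        simpa using PySem.List.sorted_pairwise (ks.filter (fun k => !(k ∈ pvSeverityOrder : Bool))) (fun x => x)
      refine List.Pairwise.imp_of_mem ?_ (pairwise_lt_of_pairwise_le_nodup hle hnd2)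
      intro a b ha hb hab
      have hra := pvRank_of_not_mem a (hmem2 a ha).2
      have hrb := pvRank_of_not_mem b (hmem2 b hb).2
      exact Prod.Lex.toLex_lt_toLex.2 (Or.inr ⟨by rw [hra, hrb], hab⟩)
    · intro a ha b hb
      have hra := pvRank_lt_of_mem a (hmem1 a ha)
      have hrb := pvRank_of_not_mem b (hmem2 b hb).2
      exact Prod.Lex.toLex_lt_toLex.2 (Or.inl (by omega))

-- ===== VERDICT (by name: the statement is the Claim_ definition above) =====
theorem format_counter_spec : Claim_equal_format_counter := by
  intro counter _
  unfold Spec_format_counter format_counter format_counter_alt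
  by_cases hc : counter = []
  · simp [hc]
  · simp only [hc, if_false]
    have hnd : (PySem.Dict.ofList counter).keys.Nodup := by
      rw [keys_ofList]; exact PySem.Set.nodup_ofList _
    have hco : (fun key => (PySem.Dict.ofList counter).contains key)
        = (fun k : String => decide (k ∈ (PySem.Dict.ofList counter).keys)) := by
      funext k
      rw [Bool.eq_iff_iff]
      simp [PySem.Dict.contains_iff_mem_keys]
    have hdiff : (fun x : String => !(PySem.Set.ofList pvSeverityOrder).contains x)
        = (fun k : String => !decide (k ∈ pvSeverityOrder)) := by
      funext k
      rw [(by decide : PySem.Set.ofList pvSeverityOrder = pvSeverityOrder)]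
      rw [Bool.eq_iff_iff]
      simp [PySem.Set.contains]
    simp only [PySem.List.foldl_append_if, PySem.List.foldl_append_eq_flatMap,
      flatMap_singleton_map, List.nil_append, PySem.Set.diff,
      set_ofList_self _ hnd, hco, hdiff]
    rw [sorted2_keys_split _ hnd, List.map_append]
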